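-- pv_equiv track=rewrite | github.com/CompLin/nheengatu | src/BuildDictionary.py | extractHomonyms
-- ===== SOURCE A (Python) =====
-- def extractHomonyms(glossary):
--     newdict=dict()
--     for dic in glossary:
--         lemma=dic.pop('lemma')
--         if newdict.get(lemma):
--             newdict[lemma].append(dic)
--         else:
--             newdict[lemma]=[dic]
--     return newdict
-- ===== SOURCE B (Python) =====
-- def extractHomonyms(glossary):
--     # Alternative decomposition: repeatedly take the first remaining entry's lemma and
--     # partition the rest of the list into that lemma's group and the entries still pending.
--     # Like A, this pops 'lemma' out of every entry dict in place.
--     newdict = {}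
--     pending = glossary
--     while pending:
--         first = pending[0]
--         lemma = first.pop('lemma')
--         group = [first]
--         rest = []
--         for d in pending[1:]:
--             if d['lemma'] == lemma:
--                 del d['lemma']
--                 group.append(d)
--             else:
--                 rest.append(d)
--         newdict[lemma] = group
--         pending = rest
--     return newdict
-- ===== Notes on version B (the rewrite author's own statement) =====
-- stated objective: alternative
-- what changed: Replaces the single pass that grows per-lemma lists in a dict with an outer loop that takes the first pending entry's lemma and partitions the remaining entries into that lemma's complete group and the still-pending rest.
import Mathlib
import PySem

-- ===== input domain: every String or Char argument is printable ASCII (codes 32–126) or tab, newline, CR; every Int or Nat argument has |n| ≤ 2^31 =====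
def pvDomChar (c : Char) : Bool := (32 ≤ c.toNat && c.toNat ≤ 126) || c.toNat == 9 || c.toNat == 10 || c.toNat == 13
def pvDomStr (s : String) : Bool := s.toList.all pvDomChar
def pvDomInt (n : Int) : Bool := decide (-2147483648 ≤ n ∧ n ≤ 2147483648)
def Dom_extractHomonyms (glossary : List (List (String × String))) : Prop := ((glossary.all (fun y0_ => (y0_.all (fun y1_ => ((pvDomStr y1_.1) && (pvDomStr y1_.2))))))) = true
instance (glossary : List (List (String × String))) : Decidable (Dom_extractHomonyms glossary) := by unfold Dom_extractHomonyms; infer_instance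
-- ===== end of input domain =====

-- B groups the entries by an outer partition loop instead of A's dict-accumulating single pass;
-- both Pythons pop 'lemma' out of every entry dict in place (the proof is about the return value,
-- and the two Pythons leave the argument in the same mutated state).

-- ===== PORT A =====
-- Literal port of A: fold over the glossary; dic.pop('lemma') is get? + erase (KeyError, i.e. a
-- missing 'lemma' key, is excluded by Pre_; the `.getD ""` default is never reached inside Pre_).
def extractHomonyms (glossary : List (List (String × String))) : List (String × List (List (String × String))) :=
  (glossary.foldl (fun newdict dic =>
      let lem : String := ((PySem.Dict.ofList dic).get? "lemma").getD ""
      let dic' : List (String × String) := ((PySem.Dict.ofList dic).erase "lemma").items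
      -- `if newdict.get(lemma):` — truthiness of an Optional list
      if (newdict.get? lem).getD [] ≠ [] then
        newdict.insert lem ((newdict.get? lem).getD [] ++ [dic'])
      else
        newdict.insert lem [dic'])
    PySem.Dict.empty).items

-- ===== PORT B =====
-- Inner `for d in pending[1:]` loop of B: partition into (group of `lemma`, rest), in order.
def pvPartition (lem : String) (ds : List (List (String × String))) :
    List (List (String × String)) × List (List (String × String)) :=
  match ds with
  | [] => ([], [])
  | d :: rest =>
      let res := pvPartition lem rest
      if ((PySem.Dict.ofList d).get? "lemma").getD "" == lem then
        (((PySem.Dict.ofList d).erase "lemma").items :: res.1, res.2)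
      else
        (res.1, d :: res.2)

-- needed by extractHomonyms_alt's termination
theorem pvPartition_snd_length_le (lem : String) (ds : List (List (String × String))) :
    (pvPartition lem ds).2.length ≤ ds.length := by
  induction ds with
  | nil => simp [pvPartition]
  | cons d rest ih =>
      simp only [pvPartition]
      split <;> simp <;> omega

-- `while pending:` loop of B as recursion on the pending list.
def extractHomonyms_alt (glossary : List (List (String × String))) : List (String × List (List (String × String))) :=
  match glossary with
  | [] => []
  | first :: tail =>
      let lem : String := ((PySem.Dict.ofList first).get? "lemma").getD ""
      let first' : List (String × String) := ((PySem.Dict.ofList first).erase "lemma").items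
      let pr := pvPartition lem tail
      (lem, first' :: pr.1) :: extractHomonyms_alt pr.2
termination_by glossary.length
decreasing_by
  simp only [List.length_cons]
  exact Nat.lt_succ_of_le (pvPartition_snd_length_le _ _)

-- ===== PRECONDITION & SPEC =====
-- Pre_ excludes exactly the inputs where the Pythons raise KeyError: an entry without a 'lemma' key.
def Pre_extractHomonyms (glossary : List (List (String × String))) : Prop :=
  ∀ dic ∈ glossary, "lemma" ∈ dic.map Prod.fst
instance (glossary : List (List (String × String))) : Decidable (Pre_extractHomonyms glossary) := by
  unfold Pre_extractHomonyms; infer_instance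

def pvWitness_extractHomonyms : (List (List (String × String))) :=
  [[("lemma", "iwa"), ("pos", "n")], [("lemma", "sura")], [("lemma", "iwa"), ("pos", "adj")]]

def Spec_extractHomonyms (glossary : List (List (String × String))) (out : List (String × List (List (String × String)))) : Prop := out = extractHomonyms_alt glossary
instance (glossary : List (List (String × String))) (out : List (String × List (List (String × String)))) : Decidable (Spec_extractHomonyms glossary out) := by unfold Spec_extractHomonyms; infer_instance

-- ===== CLAIM (what is proved, stated in full; the proofs are below) =====
def Claim_equal_extractHomonyms : Prop := ∀ (glossary : List (List (String × String))), Dom_extractHomonyms glossary → Pre_extractHomonyms glossary → Spec_extractHomonyms glossary (extractHomonyms glossary)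

-- ===== LEMMAS AND PROOFS =====

-- the per-entry key and erased body both ports compute
def pvKey (d : List (String × String)) : String := ((PySem.Dict.ofList d).get? "lemma").getD ""
def pvBody (d : List (String × String)) : List (String × String) := ((PySem.Dict.ofList d).erase "lemma").items

-- first occurrences of a list, in order (structural form of PySem.Set.ofList)
def pvDedup : List String → List String
  | [] => []
  | x :: xs => x :: (pvDedup xs).filter (fun y => !(y == x))

-- the grouping both ports compute: keys in first-occurrence order, each paired with
-- the erased bodies of its entries in original order
def pvG (ps : List (String × List (String × String))) : List (String × List (List (String × String))) :=
  (pvDedup (ps.map Prod.fst)).map (fun k => (k, (ps.filter (fun p => p.1 == k)).map Prod.snd))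

theorem pvUpdate_eq (l s : List String) :
    PySem.Set.update s l = s ++ (pvDedup l).filter (fun y => !(s.contains y)) := by
  induction l generalizing s with
  | nil => simp [PySem.Set.update, pvDedup]
  | cons x xs ih =>
      show PySem.Set.update (PySem.Set.add s x) xs = _
      rw [ih]
      simp only [PySem.Set.add, PySem.Set.contains]
      by_cases h : List.contains s x
      · rw [if_pos h]
        simp only [pvDedup, List.filter_cons, h, Bool.not_true,
          if_neg (by simp : ¬ (false = true)), List.filter_filter]
        congr 1
        apply List.filter_congr
        intro y _
        by_cases hyx : (y == x) = true
        · have : y = x := eq_of_beq hyx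
          subst this
          simp only [h, Bool.not_true, BEq.rfl, Bool.and_false]
        · simp [hyx]
      · rw [if_neg h]
        rw [List.append_assoc]
        congr 1
        simp only [pvDedup, List.filter_cons]
        rw [if_pos (by simp_all : (!s.contains x) = true)]
        have hcons : [x] ++ List.filter (fun y => !List.contains (s ++ [x]) y) (pvDedup xs)
            = x :: List.filter (fun y => !List.contains (s ++ [x]) y) (pvDedup xs) := rfl
        rw [hcons, List.filter_filter]
        congr 1
        apply List.filter_congr
        intro y _
        simp only [List.contains_append, Bool.not_or, List.contains_cons]
        by_cases hyx : (y == x) = true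
        · simp [hyx]
        · simp [hyx, Bool.and_comm]

theorem pvOfList_eq_pvDedup (l : List String) : PySem.Set.ofList l = pvDedup l := by
  have := pvUpdate_eq l []
  simpa [PySem.Set.ofList, PySem.Set.update, PySem.Set.empty] using this

theorem pvDedup_filter (k : String) (xs : List String) :
    pvDedup (xs.filter (fun y => !(y == k))) = (pvDedup xs).filter (fun y => !(y == k)) := by
  induction xs with
  | nil => simp [pvDedup]
  | cons x xs ih =>
      by_cases hxk : (x == k) = true
      · have hx : x = k := eq_of_beq hxk
        subst hx
        simp only [pvDedup, List.filter_cons, BEq.rfl, Bool.not_true,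
          if_neg (by simp : ¬ (false = true)), List.filter_filter]
        rw [ih]
        apply List.filter_congr
        intro y _
        simp
      · simp only [pvDedup, List.filter_cons, hxk, Bool.not_false, List.filter_filter]
        rw [if_pos trivial, if_pos trivial]
        simp only [pvDedup]
        rw [ih, List.filter_filter]
        congr 1
        apply List.filter_congr
        intro y _
        simp [Bool.and_comm]

theorem pvStepA (nd : PySem.Dict String (List (List (String × String)))) (k : String)
    (b : List (String × String)) :
    (if (nd.get? k).getD [] ≠ [] then nd.insert k ((nd.get? k).getD [] ++ [b])
     else nd.insert k [b]) = nd.modify k [] (fun x => x ++ [b]) := by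
  by_cases h : (nd.get? k).getD [] = []
  · simp [h, PySem.Dict.modify, PySem.Dict.getD]
  · simp [h, PySem.Dict.modify, PySem.Dict.getD]

theorem pvPartition_eq (k : String) (ds : List (List (String × String))) :
    pvPartition k ds = ((ds.filter (fun d => pvKey d == k)).map pvBody,
      ds.filter (fun d => !(pvKey d == k))) := by
  induction ds with
  | nil => simp [pvPartition]
  | cons d rest ih =>
      simp only [pvPartition, ih, List.filter_cons]
      by_cases h : (pvKey d == k) = true
      · rw [if_pos h]
        simp [pvKey, pvBody] at h ⊢
        simp [h]
      · rw [if_neg (by simpa [pvKey] using h)]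
        simp [h]


theorem pvB_eq_G (glossary : List (List (String × String))) :
    extractHomonyms_alt glossary = pvG (glossary.map (fun d => (pvKey d, pvBody d))) := by
  induction glossary using extractHomonyms_alt.induct with
  | case1 => simp [extractHomonyms_alt, pvG, pvDedup]
  | case2 first tail lem pr ih =>
      rw [extractHomonyms_alt]
      simp only [pr, lem, pvPartition_eq] at ih
      simp only [pvPartition_eq]
      rw [ih]
      simp only [show ((PySem.Dict.ofList first).get? "lemma").getD "" = pvKey first from rfl,
        show ((PySem.Dict.ofList first).erase "lemma").items = pvBody first from rfl]
      set K := pvKey first with hK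
      set B := pvBody first with hB
      set ps' := tail.map (fun d => (pvKey d, pvBody d)) with hps'
      rw [List.map_cons]
      conv_rhs => rw [pvG]
      simp only [List.map_cons, pvDedup, List.filter_cons, BEq.rfl]
      congr 1
      · rw [if_pos trivial]
        simp only [List.filter_map, List.map_cons, List.map_map]
        rfl
      · rw [pvG]
        simp only [List.map_map]
        have hkeys : List.map (Prod.fst ∘ (fun d => (pvKey d, pvBody d)))
            (List.filter (fun d => !pvKey d == K) tail)
            = List.filter (fun y => !y == K)
                (List.map (Prod.fst ∘ (fun d => (pvKey d, pvBody d))) tail) := by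
          rw [List.filter_map]
          rfl
        rw [hkeys, pvDedup_filter]
        apply List.map_congr_left
        intro k hk
        have hkK : ¬ ((k == K) = true) := by
          have := List.of_mem_filter hk
          simpa using this
        have hKk : (pvKey first == k) = false := by
          rw [show K = pvKey first from hK] at hkK
          rcases h : (pvKey first == k) with _ | _
          · rfl
          · exact absurd (by simp [eq_of_beq h] : (k == pvKey first) = true) hkK
        rw [if_neg (by simp [hKk])]
        congr 1
        rw [List.filter_map, List.filter_map, List.filter_filter]
        refine congrArg (List.map Prod.snd) (congrArg (List.map (fun d => (pvKey d, pvBody d))) ?_)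
        apply List.filter_congr
        intro d _
        simp only [Function.comp]
        rcases hdk : (pvKey d == k) with _ | _
        · simp
        · have : pvKey d = k := eq_of_beq hdk
          have hne : (pvKey d == K) = false := by
            rw [this, hK]
            rcases h2 : (k == pvKey first) with _ | _
            · rfl
            · exact absurd (by simp [eq_of_beq h2, hK] : (k == K) = true) hkK
          simp [hne]

theorem pvFoldA (g : List (List (String × String))) (d0 : PySem.Dict String (List (List (String × String)))) :
    g.foldl (fun newdict dic =>
      let lem : String := ((PySem.Dict.ofList dic).get? "lemma").getD ""
      let dic' : List (String × String) := ((PySem.Dict.ofList dic).erase "lemma").items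
      if (newdict.get? lem).getD [] ≠ [] then
        newdict.insert lem ((newdict.get? lem).getD [] ++ [dic'])
      else
        newdict.insert lem [dic']) d0
    = (g.map (fun d => (pvKey d, pvBody d))).foldl
        (fun d p => d.modify p.1 [] (fun x => x ++ [p.2])) d0 := by
  induction g generalizing d0 with
  | nil => rfl
  | cons d rest ih =>
      simp only [List.foldl_cons, List.map_cons]
      rw [← ih]
      congr 1
      exact pvStepA d0 (pvKey d) (pvBody d)

theorem pvA_eq_G (glossary : List (List (String × String))) :
    extractHomonyms glossary = pvG (glossary.map (fun d => (pvKey d, pvBody d))) := by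
  unfold extractHomonyms
  rw [pvFoldA]
  set ps := glossary.map (fun d => (pvKey d, pvBody d)) with hps
  have hnd : (ps.foldl (fun d p => d.modify p.1 [] (fun x => x ++ [p.2])) PySem.Dict.empty).keys.Nodup := by
    apply PySem.Dict.nodup_keys_foldl_modify_key ps Prod.fst [] (fun _ p => (fun x => x ++ [p.2]))
    simp [PySem.Dict.keys_empty]
  rw [PySem.Dict.items_eq_map_keys _ hnd []]
  have hkeys : (ps.foldl (fun d p => d.modify p.1 [] (fun x => x ++ [p.2])) PySem.Dict.empty).keys
      = pvDedup (ps.map Prod.fst) := by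
    rw [PySem.Dict.keys_foldl_modify_key ps Prod.fst [] (fun _ p => (fun x => x ++ [p.2]))]
    rw [PySem.Dict.keys_empty, ← pvOfList_eq_pvDedup]
    rfl
  rw [hkeys]
  unfold pvG
  apply List.map_congr_left
  intro k _
  rw [PySem.Dict.getD_foldl_modify_append ps PySem.Dict.empty k]
  simp [PySem.Dict.getD_empty]

-- ===== VERDICT (by name: the statement is the Claim_ definition above) =====
theorem extractHomonyms_spec : Claim_equal_extractHomonyms := by
  intro glossary _ _
  unfold Spec_extractHomonyms
  rw [pvA_eq_G, pvB_eq_G]
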